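-- pv_equiv track=rewrite | github.com/NetworkingB2A/DiffSync | utils/utils.py | custom_field_mapping
-- ===== SOURCE A (Python) =====
-- def custom_field_mapping(attrs: any) -> dict:
--     custom_fields = {"data_source": "dnac"}
--     for k, v in attrs.items():
--         if k in [
--             "platform_object_uuid",
--         ]:
--             custom_fields[k] = v
--         elif k == "primary_ip":
--             custom_fields["device_discovery_address"] = v
--     return custom_fields
-- ===== SOURCE B (Python) =====
-- FIELD_MAP = (
--     ("platform_object_uuid", "platform_object_uuid"),
--     ("primary_ip", "device_discovery_address"),
-- )
--
--
-- def custom_field_mapping(attrs: any) -> dict: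
--     custom_fields = {"data_source": "dnac"}
--     for src, dst in FIELD_MAP:
--         if src in attrs:
--             custom_fields[dst] = attrs[src]
--     return custom_fields
-- ===== Notes on version B (the rewrite author's own statement) =====
-- stated objective: alternative
-- what changed: Inverts the traversal: instead of scanning attrs.items() and branching per item, B loops over the fixed (src, dst) field table and probes attrs by membership/subscript, so the input is never iterated at all.
import Mathlib
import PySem

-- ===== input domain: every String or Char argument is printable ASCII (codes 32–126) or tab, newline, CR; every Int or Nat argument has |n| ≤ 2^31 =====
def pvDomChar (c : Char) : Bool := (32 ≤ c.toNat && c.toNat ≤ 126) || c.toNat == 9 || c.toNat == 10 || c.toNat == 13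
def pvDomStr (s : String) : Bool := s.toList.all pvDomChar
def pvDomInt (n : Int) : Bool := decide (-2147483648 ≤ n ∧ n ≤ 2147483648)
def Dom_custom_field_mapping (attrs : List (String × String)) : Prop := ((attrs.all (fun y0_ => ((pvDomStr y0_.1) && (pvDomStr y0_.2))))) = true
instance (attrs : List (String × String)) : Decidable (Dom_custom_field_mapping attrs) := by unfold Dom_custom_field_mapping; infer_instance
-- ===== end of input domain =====

-- B loops over the fixed (src,dst) field table probing attrs by membership/subscript, instead of scanning attrs.items() and branching; same result, no speed claim.


-- ===== PORT A =====
def custom_field_mapping (attrs : List (String × String)) : List (String × String) :=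
  (attrs.foldl (fun cf kv =>
      if kv.1 ∈ ["platform_object_uuid"] then cf.insert kv.1 kv.2
      else if kv.1 == "primary_ip" then cf.insert "device_discovery_address" kv.2
      else cf)
    (PySem.Dict.ofList [("data_source", "dnac")])).items

-- ===== PORT B =====
-- the module-level FIELD_MAP table of Source B
def pvFieldMap : List (String × String) :=
  [("platform_object_uuid", "platform_object_uuid"),
   ("primary_ip", "device_discovery_address")]

-- 'src in attrs' / 'attrs[src]' are dict membership and subscript on the dict attrs represents: get? (first match)
def custom_field_mapping_alt (attrs : List (String × String)) : List (String × String) :=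
  (pvFieldMap.foldl (fun cf sd =>
      match (PySem.Dict.mk attrs).get? sd.1 with
      | some v => cf.insert sd.2 v
      | none => cf)
    (PySem.Dict.ofList [("data_source", "dnac")])).items

-- ===== PRECONDITION & SPEC =====
-- Pre_ excludes association lists with duplicate keys (no Python dict produces them) and inputs where
-- "primary_ip" precedes "platform_object_uuid" with both present: there A and B build Python-equal dicts
-- in different insertion orders — an order no caller specifies — which the item-list representation distinguishes.
def Pre_custom_field_mapping (attrs : List (String × String)) : Prop :=
  (attrs.map Prod.fst).Nodup ∧
  (attrs.map Prod.fst).filter (fun k => k == "platform_object_uuid" || k == "primary_ip")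
    ≠ ["primary_ip", "platform_object_uuid"]
instance (attrs : List (String × String)) : Decidable (Pre_custom_field_mapping attrs) := by
  unfold Pre_custom_field_mapping; infer_instance

def pvWitness_custom_field_mapping : (List (String × String)) :=
  [("platform_object_uuid", "u-1"), ("hostname", "sw1"), ("primary_ip", "10.0.0.1")]

def Spec_custom_field_mapping (attrs : List (String × String)) (out : List (String × String)) : Prop := out = custom_field_mapping_alt attrs
instance (attrs : List (String × String)) (out : List (String × String)) : Decidable (Spec_custom_field_mapping attrs out) := by unfold Spec_custom_field_mapping; infer_instance

-- ===== CLAIM (what is proved, stated in full; the proofs are below) =====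
def Claim_equal_custom_field_mapping : Prop := ∀ (attrs : List (String × String)), Dom_custom_field_mapping attrs → Pre_custom_field_mapping attrs → Spec_custom_field_mapping attrs (custom_field_mapping attrs)

-- ===== LEMMAS AND PROOFS =====

-- proof-only abbreviations: the items A's loop acts on, and what it does to them
def pvRel (kv : String × String) : Bool :=
  kv.1 == "platform_object_uuid" || kv.1 == "primary_ip"

def pvMapFn (kv : String × String) : Option (String × String) :=
  if kv.1 ∈ ["platform_object_uuid"] then some (kv.1, kv.2)
  else if kv.1 == "primary_ip" then some ("device_discovery_address", kv.2)
  else none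

def pvTrans (kv : String × String) : String × String :=
  if kv.1 == "platform_object_uuid" then kv else ("device_discovery_address", kv.2)

-- A's loop only acts on the mapped occurrences, in order
theorem pv_foldl_filterMap (attrs : List (String × String)) (cf : PySem.Dict String String) :
    attrs.foldl (fun cf kv =>
      if kv.1 ∈ ["platform_object_uuid"] then cf.insert kv.1 kv.2
      else if kv.1 == "primary_ip" then cf.insert "device_discovery_address" kv.2
      else cf) cf
    = (attrs.filterMap pvMapFn).foldl (fun cf kv => cf.insert kv.1 kv.2) cf := by
  induction attrs generalizing cf with
  | nil => rfl
  | cons kv rest ih =>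
    rw [List.foldl_cons, List.filterMap_cons]
    by_cases h1 : kv.1 = "platform_object_uuid"
    · have hm : pvMapFn kv = some kv := by
        simp only [pvMapFn, List.mem_singleton, h1, if_pos]
        rw [← h1]
      have hstep : (if kv.1 ∈ ["platform_object_uuid"] then cf.insert kv.1 kv.2
          else if kv.1 == "primary_ip" then cf.insert "device_discovery_address" kv.2
          else cf) = cf.insert kv.1 kv.2 := by simp [h1]
      rw [hm, hstep, List.foldl_cons]
      exact ih _
    · by_cases h2 : kv.1 = "primary_ip"
      · have hm : pvMapFn kv = some ("device_discovery_address", kv.2) := by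
          simp [pvMapFn, h2]
        have hstep : (if kv.1 ∈ ["platform_object_uuid"] then cf.insert kv.1 kv.2
            else if kv.1 == "primary_ip" then cf.insert "device_discovery_address" kv.2
            else cf) = cf.insert "device_discovery_address" kv.2 := by simp [h2]
        rw [hm, hstep, List.foldl_cons]
        exact ih _
      · have hm : pvMapFn kv = none := by simp [pvMapFn, h1, h2]
        have hstep : (if kv.1 ∈ ["platform_object_uuid"] then cf.insert kv.1 kv.2
            else if kv.1 == "primary_ip" then cf.insert "device_discovery_address" kv.2
            else cf) = cf := by simp [h1, h2]
        rw [hm, hstep]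
        exact ih cf

-- the mapped occurrences are the relevant items, renamed
theorem pv_filterMap_eq (attrs : List (String × String)) :
    attrs.filterMap pvMapFn = (attrs.filter pvRel).map pvTrans := by
  induction attrs with
  | nil => rfl
  | cons kv rest ih =>
    rw [List.filterMap_cons, List.filter_cons]
    by_cases h1 : kv.1 = "platform_object_uuid"
    · have hm : pvMapFn kv = some kv := by
        simp only [pvMapFn, List.mem_singleton, h1, if_pos]
        rw [← h1]
      have hr : pvRel kv = true := by simp [pvRel, h1]
      have ht : pvTrans kv = kv := by simp [pvTrans, h1]
      rw [hm, hr]; simp only [if_true, List.map_cons, ht, ih]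
    · by_cases h2 : kv.1 = "primary_ip"
      · have hm : pvMapFn kv = some ("device_discovery_address", kv.2) := by
          simp [pvMapFn, h2]
        have hr : pvRel kv = true := by simp [pvRel, h2]
        have ht : pvTrans kv = ("device_discovery_address", kv.2) := by simp [pvTrans, h1]
        rw [hm, hr]; simp only [if_true, List.map_cons, ht, ih]
      · have hm : pvMapFn kv = none := by simp [pvMapFn, h1, h2]
        have hr : pvRel kv = false := by simp [pvRel, h1, h2]
        rw [hm, hr]; simp [ih]

-- first-match lookup on the literal dict is find?
theorem pv_get?_mk (l : List (String × String)) (k : String) :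
    (PySem.Dict.mk l).get? k = (l.find? (fun kv => kv.1 == k)).map (·.2) := by
  induction l with
  | nil => rfl
  | cons kv rest ih =>
    rw [PySem.Dict.get?_mk_cons, List.find?_cons]
    by_cases h : kv.1 = k
    · simp [h]
    · have hb : (kv.1 == k) = false := by simp [h]
      simp [hb, ih]

-- filtering by a predicate that implies pvRel factors through the pvRel filter
theorem pv_filter_through (l : List (String × String)) (q : (String × String) → Bool)
    (h : ∀ x, q x → pvRel x) : l.filter q = (l.filter pvRel).filter q := by
  rw [List.filter_filter]
  apply List.filter_congr
  intro x _
  by_cases hq : q x <;> simp [hq]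
  exact h x hq

-- a nodup list over the two mapped keys, not in the excluded order, has one of four shapes
theorem pv_two_key_shapes (l : List String) (hnd : l.Nodup)
    (hmem : ∀ x ∈ l, x = "platform_object_uuid" ∨ x = "primary_ip")
    (hne : l ≠ ["primary_ip", "platform_object_uuid"]) :
    l = [] ∨ l = ["platform_object_uuid"] ∨ l = ["primary_ip"] ∨
      l = ["platform_object_uuid", "primary_ip"] := by
  match l, hnd, hmem, hne with
  | [], _, _, _ => exact Or.inl rfl
  | [x], _, hmem, _ =>
    rcases hmem x (by simp) with h | h <;> simp [h]
  | x :: y :: rest, hnd, hmem, hne =>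
    rcases hmem x (by simp) with hx | hx <;> rcases hmem y (by simp) with hy | hy
    · exact absurd (hx.trans hy.symm) (by simp at hnd; tauto)
    · have hrest : rest = [] := by
        cases rest with
        | nil => rfl
        | cons z _ =>
          rcases hmem z (by simp) with hz | hz <;> simp [hx, hy, hz] at hnd
      simp [hx, hy, hrest]
    · have hrest : rest = [] := by
        cases rest with
        | nil => rfl
        | cons z _ =>
          rcases hmem z (by simp) with hz | hz <;> simp [hx, hy, hz] at hnd
      exact absurd (by simp [hx, hy, hrest]) hne
    · exact absurd (hx.trans hy.symm) (by simp at hnd; tauto)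

-- ===== VERDICT (by name: the statement is the Claim_ definition above) =====
theorem custom_field_mapping_spec : Claim_equal_custom_field_mapping := by
  intro attrs _ hpre
  obtain ⟨hnd, hord⟩ := hpre
  unfold Spec_custom_field_mapping custom_field_mapping custom_field_mapping_alt
  rw [pv_foldl_filterMap, pv_filterMap_eq]
  simp only [pvFieldMap, List.foldl_cons, List.foldl_nil]
  rw [pv_get?_mk, pv_get?_mk]
  -- classify the relevant keys
  have hfac : (attrs.map Prod.fst).filter (fun k => k == "platform_object_uuid" || k == "primary_ip")
      = (attrs.filter pvRel).map Prod.fst := by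
    rw [List.filter_map]; rfl
  have hK := pv_two_key_shapes _ (List.Nodup.filter _ hnd)
    (by intro x hx
        have := (List.mem_filter.mp hx).2
        simp only [Bool.or_eq_true, beq_iff_eq] at this
        exact this) hord
  rw [hfac] at hK
  have hplat : attrs.filter (fun kv => kv.1 == "platform_object_uuid")
      = (attrs.filter pvRel).filter (fun kv => kv.1 == "platform_object_uuid") := by
    apply pv_filter_through; intro x hx; simp [pvRel]; simp at hx; exact Or.inl hx
  have hprim : attrs.filter (fun kv => kv.1 == "primary_ip")
      = (attrs.filter pvRel).filter (fun kv => kv.1 == "primary_ip") := by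
    apply pv_filter_through; intro x hx; simp [pvRel]; simp at hx; exact Or.inr hx
  rw [← List.head?_filter, ← List.head?_filter, hplat, hprim]
  rcases hK with h | h | h | h
  · have hF : attrs.filter pvRel = [] := List.map_eq_nil_iff.mp h
    rw [hF]; rfl
  · obtain ⟨k, v, F', hF⟩ : ∃ k v F', attrs.filter pvRel = (k, v) :: F' := by
      cases hFc : attrs.filter pvRel with
      | nil => rw [hFc] at h; simp at h
      | cons a b => exact ⟨a.1, a.2, b, rfl⟩
    rw [hF] at h ⊢
    simp only [List.map_cons] at h
    have hk : k = "platform_object_uuid" := (List.cons.inj h).1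
    have hF' : F' = [] := List.map_eq_nil_iff.mp (List.cons.inj h).2
    subst hk; rw [hF']; rfl
  · obtain ⟨k, v, F', hF⟩ : ∃ k v F', attrs.filter pvRel = (k, v) :: F' := by
      cases hFc : attrs.filter pvRel with
      | nil => rw [hFc] at h; simp at h
      | cons a b => exact ⟨a.1, a.2, b, rfl⟩
    rw [hF] at h ⊢
    simp only [List.map_cons] at h
    have hk : k = "primary_ip" := (List.cons.inj h).1
    have hF' : F' = [] := List.map_eq_nil_iff.mp (List.cons.inj h).2
    subst hk; rw [hF']; rfl
  · obtain ⟨k1, v1, k2, v2, F', hF⟩ : ∃ k1 v1 k2 v2 F',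
        attrs.filter pvRel = (k1, v1) :: (k2, v2) :: F' := by
      cases hFc : attrs.filter pvRel with
      | nil => rw [hFc] at h; simp at h
      | cons a b =>
        cases b with
        | nil => rw [hFc] at h; simp at h
        | cons c d => exact ⟨a.1, a.2, c.1, c.2, d, rfl⟩
    rw [hF] at h ⊢
    simp only [List.map_cons] at h
    have hk1 : k1 = "platform_object_uuid" := (List.cons.inj h).1
    have hk2 : k2 = "primary_ip" := (List.cons.inj (List.cons.inj h).2).1
    have hF' : F' = [] := List.map_eq_nil_iff.mp (List.cons.inj (List.cons.inj h).2).2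
    subst hk1; subst hk2; rw [hF']; rfl
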